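-- pv_equiv track=rewrite | github.com/jelber2/RawHash2 | test/scripts/refine_moves_remora.py | query_to_signal_to_mv_tag
-- ===== SOURCE A (Python) =====
-- def query_to_signal_to_mv_tag(query_to_signal, stride, original_ts=0):
--     """Convert a query_to_signal array to mv:B:c tag string.
--
--     query_to_signal: int array of length (seq_len + 1), where
--         query_to_signal[i] is the signal index for the start of base i.
--         Remora returns these in adapter-trimmed space (0-based).
--     stride: the basecaller stride (e.g., 6 for dorado R10.4.1 SUP).
--     original_ts: the original template_start from the BAM ts tag.
--         Remora's q2s is in trimmed space; we add original_ts to convert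
--         back to raw signal coordinates that rawhash2 expects.
--
--     Returns: "mv:B:c,STRIDE,move_values..." and ts:i offset.
--     """
--     # Remora q2s is 0-based (adapter-trimmed). Add original_ts to get
--     # positions in raw signal space.
--     ts_offset = int(query_to_signal[0]) + original_ts
--
--     # Number of signal chunks from ts_offset to end
--     # Each chunk is `stride` samples wide
--     last_sig = int(query_to_signal[-1]) + original_ts
--     n_chunks = (last_sig - ts_offset + stride - 1) // stride
--
--     # Build move array: for each chunk, 1 if a new base starts, else 0
--     moves = [0] * n_chunks
--     for base_idx in range(len(query_to_signal) - 1):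
--         sig_start = int(query_to_signal[base_idx]) + original_ts
--         chunk_idx = (sig_start - ts_offset) // stride
--         if 0 <= chunk_idx < n_chunks:
--             moves[chunk_idx] = 1
--
--     # First move should always be 1 (first base starts at chunk 0)
--     if n_chunks > 0:
--         moves[0] = 1
--
--     mv_values = ','.join(str(m) for m in moves)
--     mv_tag = f"mv:B:c,{stride},{mv_values}"
--     ts_tag = f"ts:i:{ts_offset}"
--     return mv_tag, ts_tag
-- ===== SOURCE B (Python) =====
-- def query_to_signal_to_mv_tag(query_to_signal, stride, original_ts=0):
--     """Sort-then-run-length rewrite: collect the distinct base-start chunk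
--     indices, sort them, and emit the move string as runs of zeros between
--     consecutive start chunks (no preallocated move array)."""
--     ts_offset = int(query_to_signal[0]) + original_ts
--     last_sig = int(query_to_signal[-1]) + original_ts
--     n_chunks = (last_sig - ts_offset + stride - 1) // stride
--
--     cand = {(int(q) + original_ts - ts_offset) // stride for q in query_to_signal[:-1]}
--     starts = sorted(c for c in cand if 0 <= c < n_chunks)
--     if n_chunks > 0 and (not starts or starts[0] != 0):
--         starts.insert(0, 0)
--
--     parts = []
--     ends = starts[1:] + [n_chunks]
--     for s, e in zip(starts, ends):
--         parts.append('1')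
--         parts.extend(['0'] * (e - s - 1))
--     mv_values = ','.join(parts)
--     mv_tag = f"mv:B:c,{stride},{mv_values}"
--     ts_tag = f"ts:i:{ts_offset}"
--     return mv_tag, ts_tag
-- ===== Notes on version B (the rewrite author's own statement) =====
-- stated objective: alternative
-- what changed: Replaces A's scatter into a preallocated move array (indexed writes, then join of str(m) per chunk) by sorting the distinct base-start chunk indices and emitting the move string as runs of zeros between consecutive starts (sort-then-run-length construction).
import Mathlib
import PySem

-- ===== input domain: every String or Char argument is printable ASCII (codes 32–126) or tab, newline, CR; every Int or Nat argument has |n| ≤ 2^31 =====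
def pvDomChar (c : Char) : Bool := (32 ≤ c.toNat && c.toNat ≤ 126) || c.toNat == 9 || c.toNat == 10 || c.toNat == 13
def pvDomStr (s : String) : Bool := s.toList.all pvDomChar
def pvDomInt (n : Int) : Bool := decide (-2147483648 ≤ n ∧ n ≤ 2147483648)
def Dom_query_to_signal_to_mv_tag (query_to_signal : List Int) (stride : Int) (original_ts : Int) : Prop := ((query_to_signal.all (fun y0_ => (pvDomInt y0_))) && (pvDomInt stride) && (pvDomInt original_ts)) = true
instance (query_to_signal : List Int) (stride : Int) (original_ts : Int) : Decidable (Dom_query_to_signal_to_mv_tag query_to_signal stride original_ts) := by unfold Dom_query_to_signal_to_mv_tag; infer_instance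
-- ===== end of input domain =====

-- B replaces A's scatter into a preallocated 0/1 move array by sorting the distinct
-- base-start chunk indices and emitting the move string as runs of zeros between
-- consecutive starts (alternative decomposition, same cost).

-- ===== PORT A =====
def query_to_signal_to_mv_tag (query_to_signal : List Int) (stride : Int) (original_ts : Int) : String × String :=
  let ts_offset : Int := PySem.List.pyGetD query_to_signal 0 0 + original_ts
  let last_sig : Int := PySem.List.pyGetD query_to_signal (-1) 0 + original_ts
  let n_chunks : Int := PySem.Int.floordiv (last_sig - ts_offset + stride - 1) stride
  let moves0 : List Int := List.replicate n_chunks.toNat 0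
  let moves1 : List Int :=
    (PySem.List.pyRange 0 ((query_to_signal.length : Int) - 1) 1).foldl (fun mv base_idx =>
      let sig_start : Int := PySem.List.pyGetD query_to_signal base_idx 0 + original_ts
      let chunk_idx : Int := PySem.Int.floordiv (sig_start - ts_offset) stride
      if 0 ≤ chunk_idx ∧ chunk_idx < n_chunks then PySem.List.pySetD mv chunk_idx 1 else mv) moves0
  let moves2 : List Int := if 0 < n_chunks then PySem.List.pySetD moves1 0 1 else moves1
  let mv_values : String := PySem.Str.join "," (moves2.map PySem.Int.toStr)
  ("mv:B:c," ++ PySem.Int.toStr stride ++ "," ++ mv_values,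
   "ts:i:" ++ PySem.Int.toStr ts_offset)

-- ===== PORT B =====
def query_to_signal_to_mv_tag_alt (query_to_signal : List Int) (stride : Int) (original_ts : Int) : String × String :=
  let ts_offset : Int := PySem.List.pyGetD query_to_signal 0 0 + original_ts
  let last_sig : Int := PySem.List.pyGetD query_to_signal (-1) 0 + original_ts
  let n_chunks : Int := PySem.Int.floordiv (last_sig - ts_offset + stride - 1) stride
  let cand : PySem.Set Int := PySem.Set.ofList
    ((PySem.List.slice query_to_signal none (some (-1))).map
      (fun q => PySem.Int.floordiv (q + original_ts - ts_offset) stride))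
  let starts0 : List Int :=
    PySem.List.sorted (cand.filter (fun c => decide (0 ≤ c ∧ c < n_chunks))) (fun x => x) false
  let starts : List Int :=
    if 0 < n_chunks ∧ (starts0 = [] ∨ starts0.head? ≠ some 0) then 0 :: starts0 else starts0
  let ends : List Int := PySem.List.slice starts (some 1) none ++ [n_chunks]
  let parts : List String :=
    (starts.zip ends).foldl (fun acc se =>
      (acc ++ ["1"]) ++ PySem.List.pyRepeat ["0"] (se.2 - se.1 - 1)) []
  let mv_values : String := PySem.Str.join "," parts
  ("mv:B:c," ++ PySem.Int.toStr stride ++ "," ++ mv_values,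
   "ts:i:" ++ PySem.Int.toStr ts_offset)

-- ===== PRECONDITION & SPEC =====
-- Pre_ excludes exactly the inputs where A raises: the empty list (IndexError on
-- query_to_signal[0]) and stride = 0 (ZeroDivisionError); B raises on the same inputs.
def Pre_query_to_signal_to_mv_tag (query_to_signal : List Int) (stride : Int) (original_ts : Int) : Prop :=
  query_to_signal ≠ [] ∧ stride ≠ 0
instance (query_to_signal : List Int) (stride : Int) (original_ts : Int) : Decidable (Pre_query_to_signal_to_mv_tag query_to_signal stride original_ts) := by unfold Pre_query_to_signal_to_mv_tag; infer_instance

def pvWitness_query_to_signal_to_mv_tag : List Int × Int × Int := ([3, 9, 10, 21], 6, 2)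

def Spec_query_to_signal_to_mv_tag (query_to_signal : List Int) (stride : Int) (original_ts : Int) (out : String × String) : Prop := out = query_to_signal_to_mv_tag_alt query_to_signal stride original_ts
instance (query_to_signal : List Int) (stride : Int) (original_ts : Int) (out : String × String) : Decidable (Spec_query_to_signal_to_mv_tag query_to_signal stride original_ts out) := by unfold Spec_query_to_signal_to_mv_tag; infer_instance

-- ===== CLAIM (what is proved, stated in full; the proofs are below) =====
def Claim_equal_query_to_signal_to_mv_tag : Prop := ∀ (query_to_signal : List Int) (stride : Int) (original_ts : Int), Dom_query_to_signal_to_mv_tag query_to_signal stride original_ts → Pre_query_to_signal_to_mv_tag query_to_signal stride original_ts → Spec_query_to_signal_to_mv_tag query_to_signal stride original_ts (query_to_signal_to_mv_tag query_to_signal stride original_ts)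

-- ===== LEMMAS AND PROOFS =====

-- A's loop 'for base_idx in range(len(q)-1): … q[base_idx] …' is a fold over q.dropLast.
lemma pvFoldRange {α : Type} (q : List Int) (g : α → Int → α) (init : α) :
    (PySem.List.pyRange 0 ((q.length : Int) - 1) 1).foldl
        (fun acc j => g acc (PySem.List.pyGetD q j 0)) init
      = q.dropLast.foldl g init := by
  rcases List.eq_nil_or_concat q with rfl | ⟨ys, y, rfl⟩
  · simp [PySem.List.pyRange_one_eq_nil]
  · simp only [List.concat_eq_append]
    have hl : (((ys ++ [y]).length : Int)) - 1 = ((ys.length : Int)) := by simp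
    rw [hl, List.dropLast_concat]
    have hcongr : (PySem.List.pyRange 0 ((ys.length : Int)) 1).foldl
        (fun acc j => g acc (PySem.List.pyGetD (ys ++ [y]) j 0)) init
        = (PySem.List.pyRange 0 ((ys.length : Int)) 1).foldl
        (fun acc j => g acc (PySem.List.pyGetD ys j 0)) init := by
      apply PySem.List.foldl_congr_mem
      intro acc j hj
      rw [PySem.List.mem_pyRange_one] at hj
      have hgd : PySem.List.pyGetD (ys ++ [y]) j 0 = PySem.List.pyGetD ys j 0 := by
        rw [PySem.List.pyGetD_eq_getElem (ys ++ [y]) 0 (by omega) (by simp; omega),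
            PySem.List.pyGetD_eq_getElem ys 0 (by omega) (by omega)]
        rw [List.getElem_append_left]
      rw [hgd]
    rw [hcongr]
    exact PySem.List.foldl_pyRange_zero_pyGetD' ys 0 g init

-- Invariant tying A's move array to a set of marked chunk indices: same length as the
-- chunk count, and entry k is 1 exactly when k is in the set, else 0.
def pvInv (n : Int) (mv : List Int) (S : List Int) : Prop :=
  mv.length = n.toNat ∧ ∀ k : Nat, k < mv.length → mv[k]? = some (if (k : Int) ∈ S then 1 else 0)

-- one scatter write matches one set insertion
lemma pvInv_step (n : Int) (mv S : List Int) (ci : Int) (h : pvInv n mv S)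
    (hci : 0 ≤ ci ∧ ci < n) :
    pvInv n (PySem.List.pySetD mv ci 1) (PySem.Set.add S ci) := by
  obtain ⟨hlen, hval⟩ := h
  rw [PySem.List.pySetD_of_nonneg mv 1 hci.1]
  refine ⟨by simpa using hlen, ?_⟩
  intro k hk
  simp only [List.length_set] at hk
  rw [List.getElem?_set]
  have hk' : k < mv.length := hk
  by_cases hEq : ci.toNat = k
  · have : (k : Int) = ci := by omega
    simp [hEq, hk', PySem.Set.mem_add, this]
  · have : (k : Int) ≠ ci := by omega
    simp only [hEq, if_false]
    rw [hval k hk']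
    simp [PySem.Set.mem_add, this]

-- A's scatter loop over the bases preserves the invariant against a ghost set fold
lemma pvInv_fold (n ts ots stride : Int) (T : List Int) (mv S : List Int) (h : pvInv n mv S) :
    pvInv n
      (T.foldl (fun mv y =>
        if 0 ≤ PySem.Int.floordiv (y + ots - ts) stride ∧
            PySem.Int.floordiv (y + ots - ts) stride < n
        then PySem.List.pySetD mv (PySem.Int.floordiv (y + ots - ts) stride) 1 else mv) mv)
      (T.foldl (fun s y =>
        if 0 ≤ PySem.Int.floordiv (y + ots - ts) stride ∧
            PySem.Int.floordiv (y + ots - ts) stride < n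
        then PySem.Set.add s (PySem.Int.floordiv (y + ots - ts) stride) else s) S) := by
  induction T generalizing mv S with
  | nil => exact h
  | cons b T ih =>
    simp only [List.foldl_cons]
    by_cases hc : 0 ≤ PySem.Int.floordiv (b + ots - ts) stride ∧
        PySem.Int.floordiv (b + ots - ts) stride < n
    · simp only [hc, and_self, if_true]
      exact ih _ _ (pvInv_step n mv S _ h hc)
    · simp only [hc, if_false]
      exact ih _ _ h

-- membership in the ghost set fold: a marked chunk is a valid chunk of some base
lemma pvMem_fold (n ts ots stride : Int) (T S : List Int) (x : Int) :
    (x ∈ T.foldl (fun s y =>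
        if 0 ≤ PySem.Int.floordiv (y + ots - ts) stride ∧
            PySem.Int.floordiv (y + ots - ts) stride < n
        then PySem.Set.add s (PySem.Int.floordiv (y + ots - ts) stride) else s) S)
      ↔ x ∈ S ∨ (x ∈ T.map (fun y => PySem.Int.floordiv (y + ots - ts) stride) ∧ 0 ≤ x ∧ x < n) := by
  induction T generalizing S with
  | nil => simp
  | cons b T ih =>
    simp only [List.foldl_cons, List.map_cons, List.mem_cons]
    rw [ih]
    by_cases hc : 0 ≤ PySem.Int.floordiv (b + ots - ts) stride ∧
        PySem.Int.floordiv (b + ots - ts) stride < n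
    · simp only [hc, and_self, if_true, PySem.Set.mem_add]
      by_cases hx : x = PySem.Int.floordiv (b + ots - ts) stride
      · subst hx; tauto
      · tauto
    · simp only [hc, if_false]
      by_cases hx : x = PySem.Int.floordiv (b + ots - ts) stride
      · subst hx; tauto
      · tauto

-- A's (fixed) move array renders as the 0/1 indicator of the marked set over the chunks
lemma pvInv_final (n : Int) (mv S : List Int) (h : pvInv n mv S) :
    mv.map PySem.Int.toStr
      = (PySem.List.pyRange 0 n 1).map (fun c => if c ∈ S then "1" else "0") := by
  obtain ⟨hlen, hval⟩ := h
  apply List.ext_getElem?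
  intro k
  rw [List.getElem?_map, List.getElem?_map, PySem.List.getElem?_pyRange_one]
  by_cases hk : k < mv.length
  · rw [hval k hk]
    have hk' : k < (n - 0).toNat := by omega
    rw [if_pos hk']
    by_cases hm : ((k : Int)) ∈ S
    · simp [hm]
      rfl
    · simp [hm]
      rfl
  · have hk' : ¬ k < (n - 0).toNat := by omega
    rw [if_neg hk', List.getElem?_eq_none (by omega)]
    rfl

-- B's run-length token list over the start chunks
def pvTokens (ss : List Int) (n : Int) : List String :=
  (ss.zip (ss.tail ++ [n])).flatMap (fun se => "1" :: List.replicate (se.2 - se.1 - 1).toNat "0")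

-- a range free of start chunks renders as a run of zeros
lemma pvZeros (a b : Int) (ss : List Int) (h : ∀ c, a ≤ c → c < b → c ∉ ss) :
    (PySem.List.pyRange a b 1).map (fun c => if c ∈ ss then "1" else "0")
      = List.replicate (b - a).toNat "0" := by
  have h1 : ∀ c ∈ PySem.List.pyRange a b 1,
      (fun c => if c ∈ ss then "1" else "0") c = (fun _ => "0") c := by
    intro c hc
    rw [PySem.List.mem_pyRange_one] at hc
    simp [h c hc.1 hc.2]
  rw [List.map_congr_left h1, List.map_const', PySem.List.length_pyRange_one]

-- run-length emission over a strictly increasing start list is the 0/1 indicator map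
lemma pvTokens_eq (n : Int) : ∀ (rest : List Int) (s : Int),
    (s :: rest).Pairwise (· < ·) → (∀ x ∈ s :: rest, x < n) →
    pvTokens (s :: rest) n
      = (PySem.List.pyRange s n 1).map (fun c => if c ∈ s :: rest then "1" else "0") := by
  intro rest
  induction rest with
  | nil =>
    intro s _ hb
    have hs : s < n := hb s (by simp)
    rw [PySem.List.pyRange_one_cons hs, List.map_cons]
    have hz : (PySem.List.pyRange (s + 1) n 1).map (fun c => if c ∈ [s] then "1" else "0")
        = List.replicate (n - (s + 1)).toNat "0" := by
      apply pvZeros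
      intro c hc _
      simp
      omega
    simp only [pvTokens, List.tail_cons, List.nil_append, List.zip_cons_cons,
      List.zip_nil_right, List.flatMap_cons, List.flatMap_nil, List.append_nil]
    rw [hz]
    have he : (n - s - 1).toNat = (n - (s + 1)).toNat := by omega
    simp [he]
  | cons t rest' ih =>
    intro s hp hb
    rw [List.pairwise_cons] at hp
    obtain ⟨hsall, hp'⟩ := hp
    have hst : s < t := hsall t (by simp)
    have htn : t < n := hb t (by simp)
    have htall : ∀ x ∈ rest', t < x := (List.pairwise_cons.mp hp').1
    have hsplit : pvTokens (s :: t :: rest') n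
        = ("1" :: List.replicate (t - s - 1).toNat "0") ++ pvTokens (t :: rest') n := by
      simp [pvTokens]
    rw [hsplit, PySem.List.pyRange_one_append s t n (le_of_lt hst) (le_of_lt htn),
      List.map_append]
    have h1 : (PySem.List.pyRange s t 1).map (fun c => if c ∈ s :: t :: rest' then "1" else "0")
        = "1" :: List.replicate (t - s - 1).toNat "0" := by
      rw [PySem.List.pyRange_one_cons hst, List.map_cons]
      have hz : (PySem.List.pyRange (s + 1) t 1).map
          (fun c => if c ∈ s :: t :: rest' then "1" else "0")
          = List.replicate (t - (s + 1)).toNat "0" := by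
        apply pvZeros
        intro c hc1 hc2
        simp only [List.mem_cons, not_or]
        refine ⟨by omega, by omega, fun hmem => ?_⟩
        exact absurd (htall c hmem) (by omega)
      rw [hz]
      have he : (t - s - 1).toNat = (t - (s + 1)).toNat := by omega
      simp [he]
    have h2 : (PySem.List.pyRange t n 1).map (fun c => if c ∈ s :: t :: rest' then "1" else "0")
        = (PySem.List.pyRange t n 1).map (fun c => if c ∈ t :: rest' then "1" else "0") := by
      apply List.map_congr_left
      intro c hc
      rw [PySem.List.mem_pyRange_one] at hc
      have hcs : c ≠ s := by omega
      simp [List.mem_cons, hcs]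
    rw [h1, h2, ← ih t hp' (fun x hx => hb x (List.mem_cons_of_mem s hx))]

-- B's append/extend loop over the zipped starts is the flat token list
lemma pvParts_eq (zs : List (Int × Int)) :
    zs.foldl (fun acc se => (acc ++ ["1"]) ++ PySem.List.pyRepeat ["0"] (se.2 - se.1 - 1)) []
      = zs.flatMap (fun se => "1" :: List.replicate (se.2 - se.1 - 1).toNat "0") := by
  have h1 : zs.foldl (fun acc se => (acc ++ ["1"]) ++ PySem.List.pyRepeat ["0"] (se.2 - se.1 - 1)) []
      = zs.foldl (fun acc se => acc ++ ("1" :: List.replicate (se.2 - se.1 - 1).toNat "0")) [] := by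
    apply PySem.List.foldl_congr_mem
    intro acc se _
    rw [PySem.List.pyRepeat_singleton, List.append_assoc, List.singleton_append]
  rw [h1, PySem.List.foldl_append_eq_flatMap]
  simp

-- the central list equality: A's scattered move array (rendered) equals B's run-length parts
lemma pvLists (T : List Int) (ts ots stride n : Int) :
    ((if 0 < n then
        PySem.List.pySetD
          (T.foldl (fun mv y =>
            if 0 ≤ PySem.Int.floordiv (y + ots - ts) stride ∧
                PySem.Int.floordiv (y + ots - ts) stride < n
            then PySem.List.pySetD mv (PySem.Int.floordiv (y + ots - ts) stride) 1 else mv)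
            (List.replicate n.toNat 0)) 0 1
      else
        T.foldl (fun mv y =>
            if 0 ≤ PySem.Int.floordiv (y + ots - ts) stride ∧
                PySem.Int.floordiv (y + ots - ts) stride < n
            then PySem.List.pySetD mv (PySem.Int.floordiv (y + ots - ts) stride) 1 else mv)
            (List.replicate n.toNat 0)).map PySem.Int.toStr)
    = (let starts0 := PySem.List.sorted
          ((PySem.Set.ofList (T.map (fun qv => PySem.Int.floordiv (qv + ots - ts) stride))).filter
            (fun c => decide (0 ≤ c ∧ c < n))) (fun x => x) false
       let starts := if 0 < n ∧ (starts0 = [] ∨ starts0.head? ≠ some 0) then 0 :: starts0 else starts0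
       (starts.zip (starts.tail ++ [n])).foldl
          (fun acc se => (acc ++ ["1"]) ++ PySem.List.pyRepeat ["0"] (se.2 - se.1 - 1)) []) := by
  simp only []
  set chunk : Int → Int := fun y => PySem.Int.floordiv (y + ots - ts) stride with hchunk
  set filtered : List Int :=
    (PySem.Set.ofList (T.map chunk)).filter (fun c => decide (0 ≤ c ∧ c < n)) with hfiltered
  set starts0 : List Int := PySem.List.sorted filtered (fun x => x) false with hstarts0
  -- ghost set for A's scatter loop
  set S : List Int := T.foldl (fun s y =>
      if 0 ≤ PySem.Int.floordiv (y + ots - ts) stride ∧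
          PySem.Int.floordiv (y + ots - ts) stride < n
      then PySem.Set.add s (PySem.Int.floordiv (y + ots - ts) stride) else s) [] with hS
  have hInv0 : pvInv n (List.replicate n.toNat 0) [] := by
    refine ⟨by simp, ?_⟩
    intro k hk
    simp only [List.length_replicate] at hk
    rw [List.getElem?_replicate, if_pos hk]
    simp
  have hInv1 := pvInv_fold n ts ots stride T (List.replicate n.toNat 0) [] hInv0
  rw [← hS] at hInv1
  -- membership facts
  have hmemS : ∀ x, x ∈ S ↔ (x ∈ T.map chunk ∧ 0 ≤ x ∧ x < n) := by
    intro x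
    rw [hS, pvMem_fold]
    simp [hchunk]
  have hperm0 : starts0.Perm filtered := PySem.List.sorted_perm filtered (fun x => x) false
  have hmem0 : ∀ x, x ∈ starts0 ↔ (x ∈ T.map chunk ∧ 0 ≤ x ∧ x < n) := by
    intro x
    rw [hperm0.mem_iff, hfiltered, List.mem_filter, PySem.Set.mem_ofList]
    simp
  have hSB : ∀ x, x ∈ S ↔ x ∈ starts0 := by
    intro x; rw [hmemS x, hmem0 x]
  have hnodup0 : starts0.Nodup :=
    hperm0.nodup_iff.mpr (List.Nodup.filter _ (PySem.Set.nodup_ofList _))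
  have hple : starts0.Pairwise (· ≤ ·) := by
    have := PySem.List.sorted_pairwise filtered (fun x => x)
    simpa using this
  have hplt : starts0.Pairwise (· < ·) := by
    have hand := List.Pairwise.and hple hnodup0
    exact hand.imp (fun h => lt_of_le_of_ne h.1 h.2)
  have hbound : ∀ x ∈ starts0, 0 ≤ x ∧ x < n := fun x hx => ((hmem0 x).1 hx).2
  by_cases hpos : 0 < n
  · -- n_chunks > 0: starts is 0 :: rest, strictly increasing, bounded by n
    have hInv2 := pvInv_step n _ _ 0 hInv1 ⟨le_refl 0, hpos⟩
    have hmapA := pvInv_final n _ _ hInv2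
    rw [if_pos hpos, hmapA]
    have hmemA : ∀ x, x ∈ PySem.Set.add S 0 ↔ (x = 0 ∨ x ∈ starts0) := by
      intro x
      rw [PySem.Set.mem_add, hSB x]
      tauto
    -- obtain starts = 0 :: rest with the needed structure
    obtain ⟨rest, hrest, hPlt, hBnd, hMem⟩ :
        ∃ rest, (if 0 < n ∧ (starts0 = [] ∨ starts0.head? ≠ some 0) then 0 :: starts0 else starts0)
            = 0 :: rest ∧
          (0 :: rest).Pairwise (· < ·) ∧ (∀ x ∈ 0 :: rest, x < n) ∧
          (∀ x, x ∈ (0 :: rest) ↔ (x = 0 ∨ x ∈ starts0)) := by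
      by_cases hcond : starts0 = [] ∨ starts0.head? ≠ some 0
      · refine ⟨starts0, by rw [if_pos ⟨hpos, hcond⟩], ?_, ?_, ?_⟩
        · rw [List.pairwise_cons]
          refine ⟨?_, hplt⟩
          intro x hx
          rcases lt_or_eq_of_le (hbound x hx).1 with h' | h'
          · exact h'
          exfalso
          rw [← h'] at hx
          rcases hcond with hc | hc
          · rw [hc] at hx; simp at hx
          · cases hh : starts0.head? with
            | none => rw [List.head?_eq_none_iff.mp hh] at hx; simp at hx
            | some h0 =>
              obtain ⟨t0, ht0⟩ := List.head?_eq_some_iff.mp hh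
              have hne0 : h0 ≠ 0 := by rw [hh] at hc; simpa using hc
              have hh0le : 0 ≤ h0 := (hbound h0 (by rw [ht0]; simp)).1
              rw [ht0] at hx hple
              rcases List.mem_cons.mp hx with h'' | h''
              · exact hne0 h''.symm
              · have := (List.pairwise_cons.mp hple).1 0 h''
                omega
        · intro x hx
          rcases List.mem_cons.mp hx with h' | h'
          · omega
          · exact (hbound x h').2
        · intro x; simp [List.mem_cons]
      · rw [not_or, not_not] at hcond
        obtain ⟨hne, hhead'⟩ := hcond
        obtain ⟨t0, ht0⟩ := List.head?_eq_some_iff.mp hhead'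
        have hcondF : ¬ (0 < n ∧ (starts0 = [] ∨ starts0.head? ≠ some 0)) := by
          intro h
          rcases h.2 with hc | hc
          · exact hne hc
          · exact hc hhead'
        refine ⟨t0, ?_, ?_, ?_, ?_⟩
        · rw [if_neg hcondF, ht0]
        · rw [← ht0]; exact hplt
        · intro x hx
          rw [← ht0] at hx
          exact (hbound x hx).2
        · intro x
          rw [ht0]
          simp only [List.mem_cons]
          tauto
    rw [hrest, pvParts_eq]
    have := pvTokens_eq n rest 0 hPlt hBnd
    rw [pvTokens] at this
    rw [this]
    apply List.map_congr_left
    intro c _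
    have : (c ∈ (0 : Int) :: rest) ↔ c ∈ PySem.Set.add S 0 := by
      rw [hMem c, hmemA c]
    by_cases hc : c ∈ PySem.Set.add S 0
    · rw [if_pos (this.mpr hc), if_pos hc]
    · rw [if_neg (fun h => hc (this.mp h)), if_neg hc]
  · -- n_chunks ≤ 0: no chunks on either side
    have hmapA := pvInv_final n _ _ hInv1
    rw [if_neg hpos, hmapA]
    have hs0nil : starts0 = [] := by
      rw [List.eq_nil_iff_forall_not_mem]
      intro x hx
      have := hbound x hx
      omega
    rw [if_neg (by intro h; exact hpos h.1), hs0nil]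
    rw [PySem.List.pyRange_one_eq_nil (by omega)]
    simp

-- ===== VERDICT (by name: the statement is the Claim_ definition above) =====
theorem query_to_signal_to_mv_tag_spec : Claim_equal_query_to_signal_to_mv_tag := by
  intro q stride ots _ _
  unfold Spec_query_to_signal_to_mv_tag
  simp only [query_to_signal_to_mv_tag, query_to_signal_to_mv_tag_alt]
  rw [PySem.List.slice_to_neg_one, PySem.List.slice_from_one]
  rw [pvFoldRange q (fun mv y =>
    if 0 ≤ PySem.Int.floordiv (y + ots - (PySem.List.pyGetD q 0 0 + ots))
          stride ∧
        PySem.Int.floordiv (y + ots - (PySem.List.pyGetD q 0 0 + ots)) stride <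
          PySem.Int.floordiv (PySem.List.pyGetD q (-1) 0 + ots -
            (PySem.List.pyGetD q 0 0 + ots) + stride - 1) stride
    then PySem.List.pySetD mv
        (PySem.Int.floordiv (y + ots - (PySem.List.pyGetD q 0 0 + ots)) stride) 1
    else mv)]
  rw [pvLists q.dropLast (PySem.List.pyGetD q 0 0 + ots) ots stride
    (PySem.Int.floordiv (PySem.List.pyGetD q (-1) 0 + ots -
      (PySem.List.pyGetD q 0 0 + ots) + stride - 1) stride)]
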